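-- pv_equiv track=rewrite | github.com/billgan1024/competitive-programming | 1502289.py | convertEmail
-- ===== SOURCE A (Python) =====
-- def convertEmail(email):
--     willDelete = False
--     beforeAt = True
--     newEmail = ""
--     for x in email:
--         x = x.lower()
--
--         willWrite = True
--
--         if x == "." and beforeAt:
--                 willWrite = False
--
--         if x == "+" and beforeAt:
--             willDelete = True
--
--
--         if x == "@":
--             beforeAt = False
--             willDelete = False
--
--
--         if willWrite and not willDelete: #writes the letter only if all the conditions are true
--             newEmail += x
--     return newEmail
-- ===== SOURCE B (Python) =====
-- def convertEmail(email):
--     at = email.find('@')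
--     local = email if at == -1 else email[:at]
--     domain = '' if at == -1 else email[at:]
--     local = local.lower()
--     plus = local.find('+')
--     if plus != -1:
--         local = local[:plus]
--     return local.replace('.', '') + domain.lower()
-- ===== Notes on version B (the rewrite author's own statement) =====
-- stated objective: faster
-- what changed: Replaces A's stateful character-by-character loop (willDelete/beforeAt flags, string concatenation) with a split-then-transform decomposition: find the at-sign, lowercase and truncate the local part at the first plus sign, strip its dots with replace, and concatenate with the lowercased domain.
import Mathlib
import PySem

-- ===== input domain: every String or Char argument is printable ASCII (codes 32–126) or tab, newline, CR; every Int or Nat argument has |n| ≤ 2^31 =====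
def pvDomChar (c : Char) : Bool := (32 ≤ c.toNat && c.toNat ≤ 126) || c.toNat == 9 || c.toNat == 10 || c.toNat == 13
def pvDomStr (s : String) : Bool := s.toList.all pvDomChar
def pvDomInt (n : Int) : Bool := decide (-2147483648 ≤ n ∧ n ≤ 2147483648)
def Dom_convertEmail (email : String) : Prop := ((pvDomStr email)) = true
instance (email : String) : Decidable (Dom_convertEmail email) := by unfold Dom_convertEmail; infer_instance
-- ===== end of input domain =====

-- B replaces A's stateful char-by-char loop with a find/slice/lower/replace decomposition (C-level str methods instead of a Python-level loop); equality of the return value is proved for all strings.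

-- ===== PORT A =====
def convertEmailStep (st : Bool × Bool × List Char) (c : Char) : Bool × Bool × List Char :=
  let x := PySem.Chars.lowerChar c
  let willDelete := st.1
  let beforeAt := st.2.1
  let newEmail := st.2.2
  let willWrite := true
  let willWrite := if x = '.' ∧ beforeAt then false else willWrite
  let willDelete := if x = '+' ∧ beforeAt then true else willDelete
  let beforeAt := if x = '@' then false else beforeAt
  let willDelete := if x = '@' then false else willDelete
  let newEmail := if willWrite ∧ ¬ willDelete then newEmail ++ [x] else newEmail
  (willDelete, beforeAt, newEmail)

def convertEmail (email : String) : String :=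
  String.ofList (email.toList.foldl convertEmailStep (false, true, [])).2.2

-- ===== PORT B =====
def convertEmail_alt (email : String) : String :=
  let atIdx := PySem.Str.find email "@"
  let loc := if atIdx = -1 then email else PySem.Str.slice email none (some atIdx)
  let dom := if atIdx = -1 then "" else PySem.Str.slice email (some atIdx) none
  let loc := PySem.Str.lower loc
  let plus := PySem.Str.find loc "+"
  let loc := if plus ≠ -1 then PySem.Str.slice loc none (some plus) else loc
  PySem.Str.replace loc "." "" ++ PySem.Str.lower dom

-- ===== PRECONDITION & SPEC =====
def Spec_convertEmail (email : String) (out : String) : Prop := out = convertEmail_alt email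
instance (email : String) (out : String) : Decidable (Spec_convertEmail email out) := by unfold Spec_convertEmail; infer_instance

-- ===== CLAIM (what is proved, stated in full; the proofs are below) =====
def Claim_equal_convertEmail : Prop := ∀ (email : String), Dom_convertEmail email → Spec_convertEmail email (convertEmail email)

-- ===== LEMMAS AND PROOFS =====

-- the common normal form both ports are reduced to
def pvSpecOut (cs : List Char) : List Char :=
  (((cs.takeWhile (· ≠ '@')).map PySem.Chars.lowerChar).takeWhile (· ≠ '+')).filter (· ≠ '.')
    ++ (cs.dropWhile (· ≠ '@')).map PySem.Chars.lowerChar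

theorem lowerChar_eq_iff (c k : Char) (h1 : ¬(65 ≤ k.toNat ∧ k.toNat ≤ 90))
    (h2 : ¬(97 ≤ k.toNat ∧ k.toNat ≤ 122)) : PySem.Chars.lowerChar c = k ↔ c = k := by
  unfold PySem.Chars.lowerChar PySem.Chars.isupper
  split_ifs with h
  · simp [Char.le_def] at h
    obtain ⟨ha, hb⟩ := h
    simp [UInt32.le_iff_toNat_le] at ha hb
    have hval : (c.toNat + 32).isValidChar := Or.inl (by omega)
    have ht : (Char.ofNat (c.toNat + 32)).toNat = c.toNat + 32 := by
      rw [Char.toNat_ofNat]; simp [hval]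
    apply iff_of_false
    · intro e
      apply h2
      have := congrArg Char.toNat e
      rw [ht] at this
      omega
    · intro e
      subst e
      exact h1 ⟨ha, hb⟩
  · simp

theorem lower_at (c : Char) : PySem.Chars.lowerChar c = '@' ↔ c = '@' :=
  lowerChar_eq_iff c '@' (by decide) (by decide)
theorem lower_plus (c : Char) : PySem.Chars.lowerChar c = '+' ↔ c = '+' :=
  lowerChar_eq_iff c '+' (by decide) (by decide)
theorem lower_dot (c : Char) : PySem.Chars.lowerChar c = '.' ↔ c = '.' :=
  lowerChar_eq_iff c '.' (by decide) (by decide)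


theorem lower_at_lit : PySem.Chars.lowerChar '@' = '@' := by decide
theorem lower_plus_lit : PySem.Chars.lowerChar '+' = '+' := by decide
theorem lower_dot_lit : PySem.Chars.lowerChar '.' = '.' := by decide
theorem foldA_after : ∀ (cs acc : List Char),
    cs.foldl convertEmailStep (false, false, acc) = (false, false, acc ++ cs.map PySem.Chars.lowerChar) := by
  intro cs
  induction cs with
  | nil => simp
  | cons c t ih =>
    intro acc
    simp only [List.foldl_cons, List.map_cons]
    rw [show convertEmailStep (false, false, acc) c = (false, false, acc ++ [PySem.Chars.lowerChar c]) by
      simp [convertEmailStep]]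
    rw [ih]
    simp

theorem foldA_del : ∀ (cs acc : List Char),
    (cs.foldl convertEmailStep (true, true, acc)).2.2
      = acc ++ (cs.dropWhile (· ≠ '@')).map PySem.Chars.lowerChar := by
  intro cs
  induction cs with
  | nil => simp
  | cons c t ih =>
    intro acc
    by_cases h : c = '@'
    · subst h
      simp only [List.foldl_cons]
      rw [show convertEmailStep (true, true, acc) '@' = (false, false, acc ++ ['@']) by
        simp [convertEmailStep, lower_at_lit]]
      rw [foldA_after]
      simp [lower_at_lit]
    · have hl : PySem.Chars.lowerChar c ≠ '@' := fun e => h ((lower_at c).mp e)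
      simp only [List.foldl_cons]
      rw [show convertEmailStep (true, true, acc) c = (true, true, acc) by
        simp [convertEmailStep, hl]]
      rw [ih]
      simp [h]

theorem foldA_main : ∀ (cs acc : List Char),
    (cs.foldl convertEmailStep (false, true, acc)).2.2 = acc ++ pvSpecOut cs := by
  intro cs
  induction cs with
  | nil => simp [pvSpecOut]
  | cons c t ih =>
    intro acc
    by_cases hat : c = '@'
    · subst hat
      simp only [List.foldl_cons]
      rw [show convertEmailStep (false, true, acc) '@' = (false, false, acc ++ ['@']) by
        simp [convertEmailStep, lower_at_lit]]
      rw [foldA_after]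
      simp [pvSpecOut, lower_at_lit]
    · have hlat : PySem.Chars.lowerChar c ≠ '@' := fun e => hat ((lower_at c).mp e)
      by_cases hp : c = '+'
      · subst hp
        simp only [List.foldl_cons]
        rw [show convertEmailStep (false, true, acc) '+' = (true, true, acc) by
          simp [convertEmailStep, lower_plus_lit]]
        rw [foldA_del]
        simp [pvSpecOut, hat, lower_plus_lit]
      · have hlp : PySem.Chars.lowerChar c ≠ '+' := fun e => hp ((lower_plus c).mp e)
        by_cases hd : c = '.'
        · subst hd
          simp only [List.foldl_cons]
          rw [show convertEmailStep (false, true, acc) '.' = (false, true, acc) by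
            simp [convertEmailStep, lower_dot_lit]]
          rw [ih]
          simp [pvSpecOut, hat, lower_dot_lit]
        · have hld : PySem.Chars.lowerChar c ≠ '.' := fun e => hd ((lower_dot c).mp e)
          simp only [List.foldl_cons]
          rw [show convertEmailStep (false, true, acc) c = (false, true, acc ++ [PySem.Chars.lowerChar c]) by
            simp [convertEmailStep, hlat, hlp, hld]]
          rw [ih]
          simp [pvSpecOut, hat, hlp, hld]

theorem singleton_prefix_iff {α : Type} (a : α) (l : List α) : [a] <+: l ↔ l.head? = some a := by
  cases l with
  | nil => simp
  | cons b t => simp [List.cons_prefix_cons, eq_comm]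

theorem singleton_infix_iff {α : Type} (a : α) (l : List α) : [a] <:+: l ↔ a ∈ l := by
  constructor
  · intro h; simpa using h.sublist
  · intro h
    obtain ⟨s, t, rfl⟩ := List.append_of_mem h
    exact ⟨s, t, by simp⟩

theorem take_drop_of_first {α : Type} [DecidableEq α] (a : α) :
    ∀ (l : List α) (n : Nat), l[n]? = some a → (∀ i < n, l[i]? ≠ some a) →
      l.take n = l.takeWhile (· ≠ a) ∧ l.drop n = l.dropWhile (· ≠ a) := by
  intro l
  induction l with
  | nil => intro n h; simp at h
  | cons c t ih =>
    intro n h hlt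
    cases n with
    | zero =>
      simp at h
      subst h
      simp
    | succ m =>
      have hc : c ≠ a := by
        intro e; exact hlt 0 (Nat.succ_pos m) (by simp [e])
      have := ih m (by simpa using h) (fun i hi => by
        have := hlt (i+1) (by omega); simpa using this)
      simp [hc, this.1, this.2]

theorem listFind_takeWhile (a : Char) (l : List Char) (h : PySem.Chars.find l [a] ≠ -1) :
    l.take (PySem.Chars.find l [a]).toNat = l.takeWhile (· ≠ a)
      ∧ l.drop (PySem.Chars.find l [a]).toNat = l.dropWhile (· ≠ a) := by
  have h0 : 0 ≤ PySem.Chars.find l [a] := by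
    have := PySem.Chars.neg_one_le_find l [a]; omega
  obtain ⟨hpre, hmin⟩ := PySem.Chars.find_spec (s := l) (sub := [a]) h0
  rw [singleton_prefix_iff, List.head?_drop] at hpre
  refine take_drop_of_first a l _ hpre (fun i hi e => ?_)
  exact hmin i hi (by rw [singleton_prefix_iff, List.head?_drop]; exact e)

theorem notMem_of_find_neg (a : Char) (l : List Char) (h : PySem.Chars.find l [a] = -1) :
    a ∉ l := by
  rw [PySem.Chars.find_eq_neg_one_iff, singleton_infix_iff] at h
  exact h

theorem replace_go_filter : ∀ (fuel : Nat) (l acc : List Char), l.length ≤ fuel →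
    PySem.Chars.replace.go ['.'] [] fuel l acc = acc.reverse ++ l.filter (· ≠ '.') := by
  intro fuel
  induction fuel with
  | zero =>
    intro l acc h
    have : l = [] := by cases l <;> simp_all
    subst this; simp [PySem.Chars.replace.go]
  | succ f ih =>
    intro l acc h
    cases l with
    | nil => simp [PySem.Chars.replace.go]
    | cons c t =>
      by_cases hc : c = '.'
      · subst hc
        simp [PySem.Chars.replace.go, List.isPrefixOf, ih t acc (by simpa using h)]
      · simp [PySem.Chars.replace.go, List.isPrefixOf, hc, ih t (c::acc) (by simpa using h),
          Ne.symm hc]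

theorem replace_dot (l : List Char) : PySem.Chars.replace l ['.'] [] = l.filter (· ≠ '.') := by
  simpa using replace_go_filter l.length l [] le_rfl

theorem tw_all (a : Char) (l : List Char) (h : a ∉ l) :
    l.takeWhile (· ≠ a) = l ∧ l.dropWhile (· ≠ a) = [] := by
  constructor
  · rw [List.takeWhile_eq_self_iff]
    intro b hb
    simp
    rintro rfl
    exact h hb
  · rw [List.dropWhile_eq_nil_iff]
    intro b hb
    simp
    rintro rfl
    exact h hb

theorem locPart (t : String) :
    (PySem.Str.replace (if PySem.Str.find (PySem.Str.lower t) "+" ≠ -1 then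
        PySem.Str.slice (PySem.Str.lower t) none (some (PySem.Str.find (PySem.Str.lower t) "+"))
      else PySem.Str.lower t) "." "").toList
    = (((t.toList.map PySem.Chars.lowerChar).takeWhile (· ≠ '+')).filter (· ≠ '.')) := by
  have hP : ("+" : String).toList = ['+'] := by decide
  have hD : ("." : String).toList = ['.'] := by decide
  have hE : ("" : String).toList = ([] : List Char) := by decide
  by_cases hplus : PySem.Str.find (PySem.Str.lower t) "+" = -1
  · rw [if_neg (fun h => h hplus)]
    rw [PySem.Str.toList_replace, hD, hE, replace_dot, PySem.Str.toList_lower, PySem.Chars.lower]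
    have hm : '+' ∉ t.toList.map PySem.Chars.lowerChar := by
      have h2 := hplus
      rw [PySem.Str.find_eq, hP, PySem.Str.toList_lower] at h2
      have := notMem_of_find_neg '+' (PySem.Chars.lower t.toList) h2
      rw [PySem.Chars.lower] at this
      exact this
    rw [(tw_all '+' _ hm).1]
  · rw [if_pos hplus]
    rw [PySem.Str.toList_replace, hD, hE, replace_dot]
    have h0 : 0 ≤ PySem.Str.find (PySem.Str.lower t) "+" := by
      have h1 : PySem.Str.find (PySem.Str.lower t) "+" = PySem.Chars.find (PySem.Str.lower t).toList ['+'] := by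
        rw [PySem.Str.find_eq, hP]
      have := PySem.Chars.neg_one_le_find (PySem.Str.lower t).toList ['+']
      omega
    rw [PySem.Str.toList_slice]
    rw [PySem.Chars.slice_eq_listSlice, PySem.List.slice_to _ h0]
    have hfe : PySem.Str.find (PySem.Str.lower t) "+" = PySem.Chars.find (PySem.Str.lower t).toList ['+'] := by
      rw [PySem.Str.find_eq, hP]
    rw [hfe]
    have hne : PySem.Chars.find (PySem.Str.lower t).toList ['+'] ≠ -1 := by rw [← hfe]; exact hplus
    rw [(listFind_takeWhile '+' _ hne).1, PySem.Str.toList_lower, PySem.Chars.lower]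

theorem altChars (email : String) : (convertEmail_alt email).toList = pvSpecOut email.toList := by
  have hA : ("@" : String).toList = ['@'] := by decide
  have hfe : PySem.Str.find email "@" = PySem.Chars.find email.toList ['@'] := by
    rw [PySem.Str.find_eq, hA]
  by_cases hat : PySem.Str.find email "@" = -1
  · have hm : '@' ∉ email.toList := notMem_of_find_neg '@' _ (by rw [← hfe]; exact hat)
    simp only [convertEmail_alt, hat, reduceIte]
    rw [String.toList_append, locPart]
    have := tw_all '@' email.toList hm
    rw [pvSpecOut, this.1, this.2]
    simp [PySem.Chars.lower]
  · have h0 : 0 ≤ PySem.Str.find email "@" := by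
      have := PySem.Chars.neg_one_le_find email.toList ['@']
      omega
    have hne : PySem.Chars.find email.toList ['@'] ≠ -1 := by rw [← hfe]; exact hat
    have htd := listFind_takeWhile '@' email.toList hne
    simp only [convertEmail_alt, hat, reduceIte]
    rw [String.toList_append, locPart]
    have hloc : (PySem.Str.slice email none (some (PySem.Str.find email "@"))).toList
        = email.toList.takeWhile (· ≠ '@') := by
      rw [PySem.Str.toList_slice, PySem.Chars.slice_eq_listSlice, PySem.List.slice_to _ h0, hfe, htd.1]
    have hdom : (PySem.Str.lower (PySem.Str.slice email (some (PySem.Str.find email "@")) none)).toList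
        = (email.toList.dropWhile (· ≠ '@')).map PySem.Chars.lowerChar := by
      rw [PySem.Str.toList_lower, PySem.Str.toList_slice, PySem.Chars.slice_eq_listSlice,
        PySem.List.slice_from _ h0, hfe, htd.2, PySem.Chars.lower]
    rw [hloc, hdom, pvSpecOut]

-- ===== VERDICT (by name: the statement is the Claim_ definition above) =====
theorem convertEmail_spec : Claim_equal_convertEmail := by
  intro email _
  unfold Spec_convertEmail
  have h1 : (convertEmail email).toList = pvSpecOut email.toList := by
    unfold convertEmail
    rw [String.toList_ofList]
    simpa using foldA_main email.toList []
  rw [← String.ofList_toList (s := convertEmail email),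
      ← String.ofList_toList (s := convertEmail_alt email), h1, altChars]
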